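-- pv_equiv track=rewrite | github.com/nignite/iot_llm | src/isa95_domain.py | suggest_isa95_queries
-- ===== SOURCE A (Python) =====
-- from typing import Dict, List, Optional, Any
--
-- def suggest_isa95_queries(table_context: Dict[str, Any]) -> List[str]:
--     """Suggest ISA-95 relevant queries based on available tables"""
--     suggestions = []
--
--     # Check available tables and suggest relevant queries
--     available_tables = table_context.keys()
--
--     if any("dev" in table.lower() or "equipment" in table.lower() for table in available_tables):
--         suggestions.extend([
--             "Show equipment availability for production area 1",
--             "Which devices are currently offline or in maintenance?",
--             "Calculate equipment utilization for last week",
--             "Show status of all temperature sensors in the plant"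
--         ])
--
--     if any("rep" in table.lower() or "data" in table.lower() for table in available_tables):
--         suggestions.extend([
--             "Show production data that exceeded specifications",
--             "Calculate average cycle time for process cell 1",
--             "What was the throughput for line 2 yesterday?",
--             "Show quality parameters out of specification"
--         ])
--
--     if any("alert" in table.lower() or "alarm" in table.lower() for table in available_tables):
--         suggestions.extend([
--             "Show all critical alarms from last 24 hours",
--             "Which equipment triggered maintenance alerts?",
--             "Calculate mean time between failures for pumps",
--             "Show quality alerts for batch production"
--         ])
--
--     return suggestions
-- ===== SOURCE B (Python) =====
-- def suggest_isa95_queries(table_context):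
--     """Suggest ISA-95 relevant queries based on available tables"""
--     # One lowercased newline-joined blob of all table names: each keyword is
--     # searched once in the blob instead of once per table name ('\n' separates
--     # names and occurs in no keyword, so no false cross-name match is possible).
--     blob = "\n".join(name.lower() for name in table_context)
--     rules = [
--         (("dev", "equipment"), [
--             "Show equipment availability for production area 1",
--             "Which devices are currently offline or in maintenance?",
--             "Calculate equipment utilization for last week",
--             "Show status of all temperature sensors in the plant"
--         ]),
--         (("rep", "data"), [
--             "Show production data that exceeded specifications",
--             "Calculate average cycle time for process cell 1",
--             "What was the throughput for line 2 yesterday?",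
--             "Show quality parameters out of specification"
--         ]),
--         (("alert", "alarm"), [
--             "Show all critical alarms from last 24 hours",
--             "Which equipment triggered maintenance alerts?",
--             "Calculate mean time between failures for pumps",
--             "Show quality alerts for batch production"
--         ]),
--     ]
--     return [q for kws, block in rules if any(k in blob for k in kws) for q in block]
-- ===== Notes on version B (the rewrite author's own statement) =====
-- stated objective: faster
-- what changed: B joins all lowercased table names once into one newline-separated blob and drives the output from a data table of (keywords, block) rules with one substring search per keyword over the blob, instead of A's three any() generator scans that re-lowercase every key and run up to six per-key substring tests.
import Mathlib
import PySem

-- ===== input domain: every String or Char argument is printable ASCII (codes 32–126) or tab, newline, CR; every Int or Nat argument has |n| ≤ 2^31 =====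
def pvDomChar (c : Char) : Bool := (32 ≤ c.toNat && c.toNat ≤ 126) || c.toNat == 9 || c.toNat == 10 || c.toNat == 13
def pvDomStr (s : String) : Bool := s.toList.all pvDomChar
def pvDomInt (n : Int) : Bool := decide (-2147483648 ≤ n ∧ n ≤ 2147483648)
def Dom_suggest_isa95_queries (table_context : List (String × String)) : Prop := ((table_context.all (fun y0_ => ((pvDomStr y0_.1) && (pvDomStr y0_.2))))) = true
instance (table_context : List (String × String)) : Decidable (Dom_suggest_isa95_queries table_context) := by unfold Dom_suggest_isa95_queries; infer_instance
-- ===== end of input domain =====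

-- B joins all lowercased table names into one '\n'-separated blob and drives the output
-- from a (keywords, block) rules table, one substring search per keyword over the blob.


-- ===== PORT A =====
-- three separate any() scans over the keys, each block extended onto `suggestions`
def suggest_isa95_queries (table_context : List (String × String)) : List String :=
  let suggestions : List String := []
  let suggestions :=
    if table_context.any (fun t => PySem.Str.isIn "dev" (PySem.Str.lower t.1)
        || PySem.Str.isIn "equipment" (PySem.Str.lower t.1)) then
      suggestions ++
        ["Show equipment availability for production area 1",
         "Which devices are currently offline or in maintenance?",
         "Calculate equipment utilization for last week",
         "Show status of all temperature sensors in the plant"]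
    else suggestions
  let suggestions :=
    if table_context.any (fun t => PySem.Str.isIn "rep" (PySem.Str.lower t.1)
        || PySem.Str.isIn "data" (PySem.Str.lower t.1)) then
      suggestions ++
        ["Show production data that exceeded specifications",
         "Calculate average cycle time for process cell 1",
         "What was the throughput for line 2 yesterday?",
         "Show quality parameters out of specification"]
    else suggestions
  let suggestions :=
    if table_context.any (fun t => PySem.Str.isIn "alert" (PySem.Str.lower t.1)
        || PySem.Str.isIn "alarm" (PySem.Str.lower t.1)) then
      suggestions ++
        ["Show all critical alarms from last 24 hours",
         "Which equipment triggered maintenance alerts?",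
         "Calculate mean time between failures for pumps",
         "Show quality alerts for batch production"]
    else suggestions
  suggestions

-- ===== PORT B =====
-- the fixed (keywords, suggestion block) rules table of Source B
def isaRules : List (List String × List String) :=
  [(["dev", "equipment"],
    ["Show equipment availability for production area 1",
     "Which devices are currently offline or in maintenance?",
     "Calculate equipment utilization for last week",
     "Show status of all temperature sensors in the plant"]),
   (["rep", "data"],
    ["Show production data that exceeded specifications",
     "Calculate average cycle time for process cell 1",
     "What was the throughput for line 2 yesterday?",
     "Show quality parameters out of specification"]),
   (["alert", "alarm"],
    ["Show all critical alarms from last 24 hours",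
     "Which equipment triggered maintenance alerts?",
     "Calculate mean time between failures for pumps",
     "Show quality alerts for batch production"])]

-- one '\n'-joined blob of the lowercased names; flat comprehension over the rules
def suggest_isa95_queries_alt (table_context : List (String × String)) : List String :=
  let blob := PySem.Str.join "\n" (table_context.map (fun t => PySem.Str.lower t.1))
  isaRules.flatMap (fun r => if r.1.any (fun k => PySem.Str.isIn k blob) then r.2 else [])

-- ===== PRECONDITION & SPEC =====
def Spec_suggest_isa95_queries (table_context : List (String × String)) (out : List String) : Prop := out = suggest_isa95_queries_alt table_context
instance (table_context : List (String × String)) (out : List String) : Decidable (Spec_suggest_isa95_queries table_context out) := by unfold Spec_suggest_isa95_queries; infer_instance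

-- ===== CLAIM (what is proved, stated in full; the proofs are below) =====
def Claim_equal_suggest_isa95_queries : Prop := ∀ (table_context : List (String × String)), Dom_suggest_isa95_queries table_context → Spec_suggest_isa95_queries table_context (suggest_isa95_queries table_context)

-- ===== LEMMAS AND PROOFS =====

-- a separator-free pattern is a prefix of `a ++ '\n' :: b` iff it is a prefix of `a`
theorem prefix_sep {p a b : List Char} (hn : '\n' ∉ p) :
    p <+: a ++ '\n' :: b ↔ p <+: a := by
  constructor
  · intro h
    rcases h with ⟨t, ht⟩
    by_cases hl : p.length ≤ a.length
    · have hpa : p = List.take p.length (a ++ '\n' :: b) := List.prefix_iff_eq_take.mp ⟨t, ht⟩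
      rw [List.take_append_of_le_length hl] at hpa
      rw [hpa]
      exact List.take_prefix _ _
    · exfalso
      apply hn
      have hget : (p ++ t)[a.length]? = some '\n' := by
        rw [ht]; simp
      have : p[a.length]? = some '\n' := by
        rwa [List.getElem?_append_left (by omega)] at hget
      exact List.mem_of_getElem? this
  · intro h
    exact h.trans (List.prefix_append _ _)

-- a separator-free pattern is an infix of `a ++ '\n' :: b` iff it is an infix of a part
theorem infix_sep {p : List Char} (a b : List Char) (hn : '\n' ∉ p) :
    p <:+: a ++ '\n' :: b ↔ p <:+: a ∨ p <:+: b := by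
  induction a with
  | nil =>
    simp only [List.nil_append, List.infix_cons_iff, List.infix_nil]
    constructor
    · rintro (hpre | hb)
      · left
        have := (prefix_sep (a := []) hn).mp (by simpa using hpre)
        simpa using this
      · exact Or.inr hb
    · rintro (rfl | hb)
      · exact Or.inl (List.nil_prefix)
      · exact Or.inr hb
  | cons x a ih =>
    rw [List.cons_append, List.infix_cons_iff, List.infix_cons_iff]
    rw [show (x :: (a ++ '\n' :: b)) = ((x :: a) ++ '\n' :: b) from rfl]
    rw [prefix_sep hn, ih]
    tauto

-- keyword search in the '\n'-joined blob = some part contains the keyword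
theorem isIn_join (p : List Char) (hp : p ≠ []) (hn : '\n' ∉ p) (ls : List (List Char)) :
    PySem.Chars.isIn p (PySem.Chars.join ['\n'] ls) = ls.any (fun l => PySem.Chars.isIn p l) := by
  induction ls with
  | nil =>
    simp only [PySem.Chars.join_nil, List.any_nil]
    rw [Bool.eq_false_iff, Ne, PySem.Chars.isIn_iff_infix, List.infix_nil]
    exact hp
  | cons x t ih =>
    cases t with
    | nil =>
      simp [PySem.Chars.join_singleton]
    | cons y r =>
      rw [PySem.Chars.join_cons_cons]
      have : x ++ ['\n'] ++ PySem.Chars.join ['\n'] (y :: r)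
           = x ++ '\n' :: PySem.Chars.join ['\n'] (y :: r) := by simp
      rw [this]
      rcases Bool.eq_false_or_eq_true (PySem.Chars.isIn p (x ++ '\n' :: PySem.Chars.join ['\n'] (y :: r))) with hT | hF
      · rw [hT]
        have hi := (PySem.Chars.isIn_iff_infix _ _).mp hT
        rw [infix_sep _ _ hn] at hi
        symm
        rw [List.any_cons, Bool.or_eq_true]
        rcases hi with h | h
        · exact Or.inl ((PySem.Chars.isIn_iff_infix _ _).mpr h)
        · refine Or.inr ?_
          rw [← ih]
          exact (PySem.Chars.isIn_iff_infix _ _).mpr h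
      · rw [hF]
        have hni := (PySem.Chars.isIn_eq_false_iff _ _).mp hF
        rw [infix_sep _ _ hn] at hni
        push Not at hni
        symm
        rw [List.any_cons, Bool.or_eq_false_iff]
        constructor
        · exact (PySem.Chars.isIn_eq_false_iff _ _).mpr hni.1
        · rw [← ih]
          exact (PySem.Chars.isIn_eq_false_iff _ _).mpr hni.2

-- the same on strings, over the mapped lowered keys
theorem isIn_blob (k : String) (hp : k.toList ≠ []) (hn : '\n' ∉ k.toList)
    (tc : List (String × String)) :
    PySem.Str.isIn k (PySem.Str.join "\n" (tc.map (fun t => PySem.Str.lower t.1)))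
      = tc.any (fun t => PySem.Str.isIn k (PySem.Str.lower t.1)) := by
  rw [PySem.Str.isIn_eq, PySem.Str.toList_join]
  have : "\n".toList = ['\n'] := rfl
  rw [this, List.map_map, isIn_join _ hp hn]
  simp [List.any_map, Function.comp_def, PySem.Str.isIn_eq, PySem.Str.toList_lower]

-- any over a disjunction splits
theorem any_or {α : Type} (l : List α) (f g : α → Bool) :
    l.any (fun x => f x || g x) = (l.any f || l.any g) := by
  induction l with
  | nil => simp
  | cons h t ih =>
    simp only [List.any_cons, ih]
    cases f h <;> cases g h <;> simp

-- ===== VERDICT (by name: the statement is the Claim_ definition above) =====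
theorem suggest_isa95_queries_spec : Claim_equal_suggest_isa95_queries := by
  intro tc _
  show _ = _
  unfold suggest_isa95_queries suggest_isa95_queries_alt
  simp only [isaRules, List.flatMap_cons, List.flatMap_nil, List.any_cons, List.any_nil,
    Bool.or_false]
  rw [isIn_blob "dev" (by decide) (by decide), isIn_blob "equipment" (by decide) (by decide),
      isIn_blob "rep" (by decide) (by decide), isIn_blob "data" (by decide) (by decide),
      isIn_blob "alert" (by decide) (by decide), isIn_blob "alarm" (by decide) (by decide)]
  rw [← any_or, ← any_or, ← any_or]
  split_ifs <;> simp
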